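-- pv_equiv track=rewrite | github.com/Joormann-Media/Joormann-Media-DevicePortal | app/api/routes_stream.py | _repo_default_service_name
-- ===== SOURCE A (Python) =====
-- def _repo_default_name(repo_link: str) -> str:
--     value = str(repo_link or '').strip().rstrip('/')
--     if not value:
--         return 'Repo'
--     tail = value.split('/')[-1].strip() or value
--     if tail.endswith('.git'):
--         tail = tail[:-4].strip() or tail
--     return tail
--
-- def _repo_default_service_name(repo_link: str) -> str:
--     base = _repo_default_name(repo_link).strip().lower()
--     safe = []
--     last_dash = False
--     for ch in base:
--         if ch.isalnum():
--             safe.append(ch)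
--             last_dash = False
--             continue
--         if ch in (' ', '-', '_', '.'):
--             if not last_dash:
--                 safe.append('-')
--                 last_dash = True
--     slug = ''.join(safe).strip('-')
--     if not slug:
--         slug = 'service'
--     return f'{slug}.service'
-- ===== SOURCE B (Python) =====
-- def _repo_default_name(repo_link: str) -> str:
--     value = str(repo_link or '').strip().rstrip('/')
--     if not value:
--         return 'Repo'
--     tail = value.split('/')[-1].strip() or value
--     if tail.endswith('.git'):
--         tail = tail[:-4].strip() or tail
--     return tail
--
-- def _repo_default_service_name(repo_link: str) -> str:
--     base = _repo_default_name(repo_link).strip().lower()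
--     # keep only alnum chars and the separator class, dropping other junk
--     kept = [ch for ch in base if ch.isalnum() or ch in ' -_.']
--     # tokenize: extract the maximal alphanumeric runs as words
--     words = []
--     i, n = 0, len(kept)
--     while i < n:
--         if kept[i].isalnum():
--             j = i + 1
--             while j < n and kept[j].isalnum():
--                 j += 1
--             words.append(''.join(kept[i:j]))
--             i = j
--         else:
--             i += 1
--     slug = '-'.join(words) or 'service'
--     return slug + '.service'
-- ===== Notes on version B (the rewrite author's own statement) =====
-- stated objective: simpler
-- what changed: The flag-based dash-collapsing state machine is replaced by a staged tokenizer: filter to the kept characters, extract the maximal alphanumeric runs as words, and join the words with single dashes (no last_dash flag, no trailing-dash strip needed).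
import Mathlib
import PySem

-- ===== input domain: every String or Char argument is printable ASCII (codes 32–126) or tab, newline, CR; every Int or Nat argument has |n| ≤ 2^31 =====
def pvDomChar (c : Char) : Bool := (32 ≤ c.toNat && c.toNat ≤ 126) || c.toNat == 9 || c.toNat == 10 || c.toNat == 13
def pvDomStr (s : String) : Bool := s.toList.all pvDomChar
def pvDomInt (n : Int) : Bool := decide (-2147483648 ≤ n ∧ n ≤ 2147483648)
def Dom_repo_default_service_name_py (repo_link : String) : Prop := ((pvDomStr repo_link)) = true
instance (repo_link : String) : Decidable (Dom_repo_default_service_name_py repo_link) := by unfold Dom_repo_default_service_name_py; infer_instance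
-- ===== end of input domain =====

-- B replaces A's flag-based dash-collapsing state machine by a staged tokenizer
-- (filter the kept characters, extract maximal alphanumeric runs as words, join with dashes); objective: simpler.

-- ===== PORT A =====
-- Python s.rstrip(chs): drop trailing characters from the set chs (ported by hand, exact)
def pvRstrip (chs : List Char) (s : List Char) : List Char :=
  (s.reverse.dropWhile (fun c => chs.contains c)).reverse

def repo_default_name_py (repo_link : String) : String :=
  -- str(repo_link or ''): on strings this is '' if repo_link is empty, else repo_link
  let v0 : String := if repo_link = "" then "" else repo_link
  let value : List Char := pvRstrip ['/'] (PySem.Chars.strip v0.toList)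
  if value = [] then "Repo"
  else
    -- value.split('/')[-1]: splitOn never returns [], so the [-1] index always hits
    let parts := PySem.Chars.splitOn value ['/']
    let last := (PySem.List.pyGet? parts (-1)).getD []
    let tail := if PySem.Chars.strip last = [] then value else PySem.Chars.strip last
    let tail := if PySem.Chars.endswith tail ".git".toList then
        (if PySem.Chars.strip (PySem.List.slice tail none (some (-4))) = [] then tail
         else PySem.Chars.strip (PySem.List.slice tail none (some (-4))))
      else tail
    String.ofList tail

def repo_default_service_name_py (repo_link : String) : String :=
  let base : List Char := PySem.Chars.lower (PySem.Chars.strip (repo_default_name_py repo_link).toList)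
  let r : List Char × Bool := base.foldl (fun st ch =>
      if PySem.Chars.isalnum ch then (st.1 ++ [ch], false)
      else if [' ', '-', '_', '.'].contains ch then
        (if st.2 then st else (st.1 ++ ['-'], true))
      else st) ([], false)
  let slug := PySem.Chars.stripChars r.1 ['-']
  let slug := if slug = [] then "service".toList else slug
  String.ofList (slug ++ ".service".toList)

-- ===== PORT B =====
-- ch.isalnum() test of Source B's tokenizer
def pvAl (c : Char) : Bool := PySem.Chars.isalnum c
-- ch in ' -_.'
def pvSepB (c : Char) : Bool := c == ' ' || c == '-' || c == '_' || c == '.'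

-- the while-loop tokenizer of Source B: extract the maximal alphanumeric runs as words
def altWords : List Char → List (List Char)
  | [] => []
  | c :: t =>
    if pvAl c then (c :: t.takeWhile pvAl) :: altWords (t.dropWhile pvAl) else altWords t
termination_by l => l.length
decreasing_by
  all_goals simp only [List.length_cons]
  all_goals first
    | exact Nat.lt_succ_of_le (List.length_dropWhile_le _ _)
    | exact Nat.lt_succ_self _

def repo_default_service_name_py_alt (repo_link : String) : String :=
  let base : List Char := PySem.Chars.lower (PySem.Chars.strip (repo_default_name_py repo_link).toList)
  -- kept = [ch for ch in base if ch.isalnum() or ch in ' -_.']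
  let kept : List Char := base.filter (fun ch => pvAl ch || pvSepB ch)
  -- slug = '-'.join(words) or 'service'
  let slug := List.intercalate ['-'] (altWords kept)
  let slug := if slug = [] then "service".toList else slug
  String.ofList (slug ++ ".service".toList)

-- ===== PRECONDITION & SPEC =====
def Spec_repo_default_service_name_py (repo_link : String) (out : String) : Prop := out = repo_default_service_name_py_alt repo_link
instance (repo_link : String) (out : String) : Decidable (Spec_repo_default_service_name_py repo_link out) := by unfold Spec_repo_default_service_name_py; infer_instance

-- ===== CLAIM (what is proved, stated in full; the proofs are below) =====
def Claim_equal_repo_default_service_name_py : Prop := ∀ (repo_link : String), Dom_repo_default_service_name_py repo_link → Spec_repo_default_service_name_py repo_link (repo_default_service_name_py repo_link)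

-- ===== LEMMAS AND PROOFS =====

def pvSp (c : Char) : Bool := [' ', '-', '_', '.'].contains c
def pvKeep (c : Char) : Bool := pvAl c || pvSp c
def pvDash (c : Char) : Bool := (['-'] : List Char).contains c
def pvRstripD (s : List Char) : List Char := (s.reverse.dropWhile pvDash).reverse

theorem pvSep_eq (c : Char) : pvSepB c = pvSp c := by
  simp only [pvSepB, pvSp, List.contains_eq_mem]
  rw [Bool.eq_iff_iff]
  simp [or_assoc]

-- the recursive reading of A's fold (output chars, final last_dash flag)
def pvFA : List Char → Bool → List Char × Bool
  | [], d => ([], d)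
  | c :: t, d =>
    if pvAl c then
      let r := pvFA t false; (c :: r.1, r.2)
    else if pvSp c then
      (if d then pvFA t true else let r := pvFA t true; ('-' :: r.1, r.2))
    else pvFA t d

-- step equations
theorem pvFA_nil (d : Bool) : pvFA [] d = ([], d) := rfl

theorem pvFA_al {c : Char} (t : List Char) (d : Bool) (h : pvAl c = true) :
    pvFA (c :: t) d = (c :: (pvFA t false).1, (pvFA t false).2) := by
  simp [pvFA, h]

theorem pvFA_sp_true {c : Char} (t : List Char) (hal : pvAl c = false) (hsp : pvSp c = true) :
    pvFA (c :: t) true = pvFA t true := by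
  simp [pvFA, hal, hsp]

theorem pvFA_sp_false {c : Char} (t : List Char) (hal : pvAl c = false) (hsp : pvSp c = true) :
    pvFA (c :: t) false = ('-' :: (pvFA t true).1, (pvFA t true).2) := by
  simp [pvFA, hal, hsp]

theorem pvFA_junk {c : Char} (t : List Char) (d : Bool) (hal : pvAl c = false)
    (hsp : pvSp c = false) : pvFA (c :: t) d = pvFA t d := by
  simp [pvFA, hal, hsp]

theorem altWords_nil : altWords [] = [] := by rw [altWords]

theorem altWords_al {c : Char} (t : List Char) (h : pvAl c = true) :
    altWords (c :: t) = (c :: t.takeWhile pvAl) :: altWords (t.dropWhile pvAl) := by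
  rw [altWords]; simp [h]

theorem altWords_sep {c : Char} (t : List Char) (h : pvAl c = false) :
    altWords (c :: t) = altWords t := by
  rw [altWords]; simp [h]

theorem pvDropWhile_head {p : Char → Bool} {l : List Char} {a : Char} {l' : List Char}
    (h : l.dropWhile p = a :: l') : p a = false := by
  induction l with
  | nil => simp at h
  | cons c t ih =>
    rw [List.dropWhile_cons] at h
    by_cases hc : p c
    · rw [if_pos hc] at h
      exact ih h
    · rw [if_neg hc] at h
      cases h
      simpa using hc

theorem pvMem_dropWhile {p : Char → Bool} {l : List Char} {x : Char}
    (h : x ∈ l.dropWhile p) : x ∈ l := by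
  induction l with
  | nil => simpa using h
  | cons c t ih =>
    rw [List.dropWhile_cons] at h
    by_cases hc : p c
    · rw [if_pos hc] at h
      exact List.mem_cons_of_mem _ (ih h)
    · rw [if_neg hc] at h
      exact h

theorem pvFoldl_eq (l : List Char) (acc : List Char) (d : Bool) :
    l.foldl (fun st ch =>
      if PySem.Chars.isalnum ch then (st.1 ++ [ch], false)
      else if [' ', '-', '_', '.'].contains ch then
        (if st.2 then st else (st.1 ++ ['-'], true))
      else st) (acc, d) = (acc ++ (pvFA l d).1, (pvFA l d).2) := by
  simp only [show (fun (st : List Char × Bool) ch =>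
      if PySem.Chars.isalnum ch then (st.1 ++ [ch], false)
      else if [' ', '-', '_', '.'].contains ch then
        (if st.2 then st else (st.1 ++ ['-'], true))
      else st) = (fun (st : List Char × Bool) ch =>
      if pvAl ch then (st.1 ++ [ch], false)
      else if pvSp ch then
        (if st.2 then st else (st.1 ++ ['-'], true))
      else st) from rfl]
  induction l generalizing acc d with
  | nil => simp [pvFA]
  | cons c t ih =>
    simp only [List.foldl_cons]
    by_cases h1 : pvAl c
    · rw [if_pos h1, ih, pvFA_al t d h1]
      simp
    · rw [if_neg h1]
      rw [Bool.not_eq_true] at h1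
      by_cases h2 : pvSp c
      · rw [if_pos h2]
        cases d with
        | false =>
          rw [if_neg (by simp), ih, pvFA_sp_false t h1 h2]
          simp
        | true =>
          rw [if_pos rfl, ih, pvFA_sp_true t h1 h2]
      · rw [if_neg h2, ih]
        rw [Bool.not_eq_true] at h2
        rw [pvFA_junk t d h1 h2]

theorem pvFA_filter (l : List Char) (d : Bool) : pvFA l d = pvFA (l.filter pvKeep) d := by
  induction l generalizing d with
  | nil => simp
  | cons c t ih =>
    by_cases hk : pvKeep c
    · have hf : (c :: t).filter pvKeep = c :: t.filter pvKeep := by simp [hk]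
      rw [hf]
      by_cases h1 : pvAl c
      · rw [pvFA_al t d h1, pvFA_al _ d h1, ih]
      · rw [Bool.not_eq_true] at h1
        have h2 : pvSp c = true := by
          have := hk; simp [pvKeep, h1] at this; exact this
        cases d with
        | false => rw [pvFA_sp_false t h1 h2, pvFA_sp_false _ h1 h2, ih]
        | true => rw [pvFA_sp_true t h1 h2, pvFA_sp_true _ h1 h2, ih]
    · have hal : pvAl c = false := by
        have := hk; simp [pvKeep] at this; exact this.1
      have hsp : pvSp c = false := by
        have := hk; simp [pvKeep] at this; exact this.2
      have hf : (c :: t).filter pvKeep = t.filter pvKeep := by simp [hk]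
      rw [hf, ← ih, pvFA_junk t d hal hsp]

theorem pvCharLe_toNat {a b : Char} (h : a ≤ b) : a.toNat ≤ b.toNat := by
  rw [Char.le_def] at h
  exact UInt32.le_iff_toNat_le.mp h

theorem pvAl_toNat {c : Char} (h : pvAl c = true) :
    (48 ≤ c.toNat ∧ c.toNat ≤ 57) ∨ (65 ≤ c.toNat ∧ c.toNat ≤ 90) ∨
      (97 ≤ c.toNat ∧ c.toNat ≤ 122) := by
  simp only [pvAl, PySem.Chars.isalnum, PySem.Chars.isalpha, PySem.Chars.isdigit,
    PySem.Chars.isupper, PySem.Chars.islower, Bool.or_eq_true, Bool.and_eq_true,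
    decide_eq_true_eq] at h
  have eA : ('A' : Char).toNat = 65 := by decide
  have eZ : ('Z' : Char).toNat = 90 := by decide
  have ea : ('a' : Char).toNat = 97 := by decide
  have ez : ('z' : Char).toNat = 122 := by decide
  have e0 : ('0' : Char).toNat = 48 := by decide
  have e9 : ('9' : Char).toNat = 57 := by decide
  rcases h with (⟨h1, h2⟩ | ⟨h1, h2⟩) | ⟨h1, h2⟩ <;>
    (have t1 := pvCharLe_toNat h1; have t2 := pvCharLe_toNat h2; omega)

theorem pvAl_not_dash {c : Char} (h : pvAl c = true) : pvDash c = false := by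
  have hb := pvAl_toNat h
  simp only [pvDash, List.contains_eq_mem, List.mem_singleton, decide_eq_false_iff_not]
  intro he
  rw [he] at hb
  have : ('-' : Char).toNat = 45 := by decide
  omega

theorem pvRstripD_no_dash {x : List Char} (h : ∀ c ∈ x, pvDash c = false) :
    pvRstripD x = x := by
  unfold pvRstripD
  cases hx : x.reverse with
  | nil =>
    have : x = [] := by simpa using congrArg List.reverse hx
    simp [this]
  | cons a b =>
    have ha : pvDash a = false := by
      apply h
      rw [← List.mem_reverse, hx]; simp
    rw [List.dropWhile_cons_of_neg (by simp [ha]), ← hx, List.reverse_reverse]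

theorem pvRstripD_append {y x : List Char} (h : pvRstripD x ≠ []) :
    pvRstripD (y ++ x) = y ++ pvRstripD x := by
  unfold pvRstripD at *
  rw [List.reverse_append, List.dropWhile_append]
  have hne : (x.reverse.dropWhile pvDash).isEmpty = false := by
    cases hx : x.reverse.dropWhile pvDash with
    | nil => exact absurd (by rw [hx]; simp) h
    | cons a b => simp
  rw [if_neg (by simp [hne])]
  simp

theorem pvRstripD_append_dash (y : List Char) : pvRstripD (y ++ ['-']) = pvRstripD y := by
  unfold pvRstripD
  simp [List.dropWhile_cons, pvDash]

theorem altWords_eq_nil_no_al {v : List Char} (h : altWords v = []) :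
    ∀ c ∈ v, pvAl c = false := by
  induction v using altWords.induct with
  | case1 => simp
  | case2 c t hc ih => rw [altWords_al t hc] at h; simp at h
  | case3 c t hc ih =>
    have hc' : pvAl c = false := by simpa using hc
    rw [altWords_sep t hc'] at h
    intro x hx
    rcases List.mem_cons.mp hx with rfl | hx'
    · exact hc'
    · exact ih h x hx'

theorem pvFA_none {u : List Char} (hk : ∀ c ∈ u, pvKeep c = true)
    (h : ∀ c ∈ u, pvAl c = false) : pvFA u true = ([], true) := by
  induction u with
  | nil => rfl
  | cons c t ih =>
    have hal : pvAl c = false := h c (by simp)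
    have hsp : pvSp c = true := by
      have := hk c (by simp)
      simp [pvKeep, hal] at this
      exact this
    rw [pvFA_sp_true t hal hsp]
    exact ih (fun x hx => hk x (by simp [hx])) (fun x hx => h x (by simp [hx]))

theorem pvFA_run {w : List Char} (hw : ∀ c ∈ w, pvAl c = true) (t : List Char) :
    pvFA (w ++ t) false = (w ++ (pvFA t false).1, (pvFA t false).2) := by
  induction w with
  | nil => simp
  | cons c v ih =>
    have hc : pvAl c = true := hw c (by simp)
    rw [List.cons_append, pvFA_al _ _ hc, ih (fun x hx => hw x (by simp [hx]))]
    simp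

theorem pvInter_singleton (a : List Char) : List.intercalate ['-'] [a] = a := by
  simp [List.intercalate]

theorem pvInter_cons₂ (a b : List Char) (l : List (List Char)) :
    List.intercalate ['-'] (a :: b :: l) = a ++ '-' :: List.intercalate ['-'] (b :: l) := by
  simp [List.intercalate, List.intersperse]

theorem altWords_head_ne_nil {v : List Char} {w : List Char} {ws : List (List Char)}
    (h : altWords v = w :: ws) : w ≠ [] := by
  induction v using altWords.induct with
  | case1 => rw [altWords_nil] at h; simp at h
  | case2 c t hc ih =>
    rw [altWords_al t hc] at h
    cases h
    simp
  | case3 c t hc ih =>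
    have hc' : pvAl c = false := by simpa using hc
    rw [altWords_sep t hc'] at h
    exact ih h

theorem pvInter_ne_nil {w : List Char} {ws : List (List Char)} (hw : w ≠ []) :
    List.intercalate ['-'] (w :: ws) ≠ [] := by
  cases ws with
  | nil => simpa [pvInter_singleton] using hw
  | cons b l =>
    rw [pvInter_cons₂]
    intro hcontra
    rcases List.append_eq_nil_iff.mp hcontra with ⟨h1, h2⟩
    simp at h2

theorem pvFA_true_spec : ∀ (n : Nat) (u : List Char), u.length ≤ n →
    (∀ c ∈ u, pvKeep c = true) →
    pvRstripD (pvFA u true).1 = List.intercalate ['-'] (altWords u) ∧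
    (pvFA u true).1.dropWhile pvDash = (pvFA u true).1 := by
  intro n
  induction n with
  | zero =>
    intro u hu _
    have : u = [] := List.length_eq_zero_iff.mp (Nat.le_zero.mp hu)
    subst this
    simp [pvFA_nil, altWords_nil, pvRstripD, List.intercalate]
  | succ n ih =>
    intro u hu hk
    cases u with
    | nil => simp [pvFA_nil, altWords_nil, pvRstripD, List.intercalate]
    | cons c t =>
      have ht : t.length ≤ n := by simpa using hu
      by_cases hc : pvAl c
      · -- a word starts at c
        have hw : ∀ x ∈ t.takeWhile pvAl, pvAl x = true := fun x hx => List.mem_takeWhile_imp hx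
        have hsplit : t = t.takeWhile pvAl ++ t.dropWhile pvAl :=
          (List.takeWhile_append_dropWhile).symm
        have hrun : pvFA t false =
            (t.takeWhile pvAl ++ (pvFA (t.dropWhile pvAl) false).1,
             (pvFA (t.dropWhile pvAl) false).2) := by
          conv_lhs => rw [hsplit]
          exact pvFA_run hw _
        have hnodash : ∀ x ∈ c :: t.takeWhile pvAl, pvDash x = false := by
          intro x hx
          rcases List.mem_cons.mp hx with rfl | hx'
          · exact pvAl_not_dash hc
          · exact pvAl_not_dash (hw x hx')
        cases hr : t.dropWhile pvAl with
        | nil =>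
          have h1 : (pvFA (c :: t) true).1 = c :: t.takeWhile pvAl := by
            rw [pvFA_al t true hc, hrun, hr, pvFA_nil]
            simp
          constructor
          · rw [h1, altWords_al t hc, hr, altWords_nil, pvInter_singleton]
            exact pvRstripD_no_dash hnodash
          · rw [h1, List.dropWhile_cons_of_neg (by simp [pvAl_not_dash hc])]
        | cons s r' =>
          have hsal : pvAl s = false := pvDropWhile_head hr
          have hsmem : s ∈ t := by
            have : s ∈ t.dropWhile pvAl := by rw [hr]; simp
            exact pvMem_dropWhile this
          have hssp : pvSp s = true := by
            have := hk s (by simp [hsmem])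
            simp [pvKeep, hsal] at this
            exact this
          have h1 : (pvFA (c :: t) true).1 =
              (c :: t.takeWhile pvAl) ++ '-' :: (pvFA r' true).1 := by
            rw [pvFA_al t true hc, hrun, hr, pvFA_sp_false r' hsal hssp]
            simp
          have hr'len : r'.length ≤ n := by
            have h2 : (t.dropWhile pvAl).length ≤ t.length := List.length_dropWhile_le _ _
            rw [hr] at h2
            simp at h2
            omega
          have hr'keep : ∀ x ∈ r', pvKeep x = true := by
            intro x hx
            have hxd : x ∈ t.dropWhile pvAl := by rw [hr]; simp [hx]
            exact hk x (by simp [pvMem_dropWhile hxd])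
          obtain ⟨ih1, ih2⟩ := ih r' hr'len hr'keep
          have hwr : altWords (s :: r') = altWords r' := altWords_sep r' hsal
          cases hwcase : altWords r' with
          | nil =>
            have hx0 : pvFA r' true = ([], true) :=
              pvFA_none hr'keep (altWords_eq_nil_no_al hwcase)
            have h1' : (pvFA (c :: t) true).1 = (c :: t.takeWhile pvAl) ++ ['-'] := by
              rw [h1, hx0]
            constructor
            · rw [h1', pvRstripD_append_dash, altWords_al t hc, hr, hwr, hwcase,
                pvInter_singleton]
              exact pvRstripD_no_dash hnodash
            · rw [h1', List.cons_append,
                List.dropWhile_cons_of_neg (by simp [pvAl_not_dash hc])]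
          | cons w0 ws =>
            have hw0 : w0 ≠ [] := altWords_head_ne_nil hwcase
            have hne : pvRstripD (pvFA r' true).1 ≠ [] := by
              rw [ih1, hwcase]
              exact pvInter_ne_nil hw0
            constructor
            · rw [h1]
              have hre : (c :: t.takeWhile pvAl) ++ '-' :: (pvFA r' true).1 =
                  ((c :: t.takeWhile pvAl) ++ ['-']) ++ (pvFA r' true).1 := by simp
              rw [hre, pvRstripD_append hne, ih1, altWords_al t hc, hr, hwr, hwcase,
                pvInter_cons₂]
              simp
            · rw [h1, List.cons_append,
                List.dropWhile_cons_of_neg (by simp [pvAl_not_dash hc])]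
      · -- c is a separator (it is kept, so sp holds)
        have hal : pvAl c = false := by simpa using hc
        have hsp : pvSp c = true := by
          have := hk c (by simp)
          simp [pvKeep, hal] at this
          exact this
        obtain ⟨ih1, ih2⟩ := ih t ht (fun x hx => hk x (by simp [hx]))
        refine ⟨?_, ?_⟩
        · rw [pvFA_sp_true t hal hsp, altWords_sep t hal]
          exact ih1
        · rw [pvFA_sp_true t hal hsp]
          exact ih2

theorem pvStripChars_eq (s : List Char) :
    PySem.Chars.stripChars s ['-'] = pvRstripD (s.dropWhile pvDash) := rfl

theorem pvCore (l : List Char) :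
    PySem.Chars.stripChars (pvFA l false).1 ['-'] =
      List.intercalate ['-'] (altWords (l.filter pvKeep)) := by
  rw [pvFA_filter, pvStripChars_eq]
  have hk : ∀ c ∈ l.filter pvKeep, pvKeep c = true := by
    intro c hc; exact (List.mem_filter.mp hc).2
  cases hu : l.filter pvKeep with
  | nil => simp [pvFA_nil, altWords_nil, pvRstripD, List.intercalate]
  | cons c t =>
    rw [hu] at hk
    by_cases hc : pvAl c
    · have hft : pvFA (c :: t) false = pvFA (c :: t) true := by
        rw [pvFA_al t false hc, pvFA_al t true hc]
      obtain ⟨h1, h2⟩ := pvFA_true_spec (c :: t).length (c :: t) le_rfl hk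
      rw [hft, h2, h1]
    · have hal : pvAl c = false := by simpa using hc
      have hsp : pvSp c = true := by
        have := hk c (by simp)
        simp [pvKeep, hal] at this
        exact this
      obtain ⟨h1, h2⟩ := pvFA_true_spec t.length t le_rfl (fun x hx => hk x (by simp [hx]))
      rw [pvFA_sp_false t hal hsp]
      show pvRstripD (List.dropWhile pvDash ('-' :: (pvFA t true).1)) = _
      rw [List.dropWhile_cons_of_pos (by simp [pvDash]), h2, h1, altWords_sep t hal]

theorem pvKeepB_eq : (fun ch => pvAl ch || pvSepB ch) = pvKeep := by
  funext c
  rw [pvKeep, pvSep_eq]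

theorem pvMain (base : List Char) :
    String.ofList ((if PySem.Chars.stripChars (base.foldl (fun st ch =>
        if PySem.Chars.isalnum ch then (st.1 ++ [ch], false)
        else if [' ', '-', '_', '.'].contains ch then
          (if st.2 then st else (st.1 ++ ['-'], true))
        else st) ([], false)).1 ['-'] = [] then "service".toList
      else PySem.Chars.stripChars (base.foldl (fun st ch =>
        if PySem.Chars.isalnum ch then (st.1 ++ [ch], false)
        else if [' ', '-', '_', '.'].contains ch then
          (if st.2 then st else (st.1 ++ ['-'], true))
        else st) ([], false)).1 ['-']) ++ ".service".toList) =
    String.ofList ((if List.intercalate ['-'] (altWords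
        (base.filter (fun ch => pvAl ch || pvSepB ch))) = [] then "service".toList
      else List.intercalate ['-'] (altWords
        (base.filter (fun ch => pvAl ch || pvSepB ch)))) ++ ".service".toList) := by
  rw [pvFoldl_eq base [] false]
  simp only [List.nil_append]
  rw [pvKeepB_eq, pvCore]

-- ===== VERDICT (by name: the statement is the Claim_ definition above) =====
theorem repo_default_service_name_py_spec : Claim_equal_repo_default_service_name_py := by
  intro s _
  show repo_default_service_name_py s = repo_default_service_name_py_alt s
  unfold repo_default_service_name_py repo_default_service_name_py_alt
  exact pvMain _
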